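-- pv_equiv track=rewrite | github.com/consolelogram/Ghost | test_search.py | energy_score
-- ===== SOURCE A (Python) =====
-- def energy_score(text):
--     if isinstance(text, bytes):
--         text = text.decode("utf-8")
--     return (
--         len(text.split())
--         + text.count("!") * 2
--         + text.count("?")
--         + sum(1 for c in text if c.isupper())
--     )
-- ===== SOURCE B (Python) =====
-- def energy_score(text):
--     if isinstance(text, bytes):
--         text = text.decode("utf-8")
--     score = 0
--     in_word = False
--     for c in text:
--         if c.isspace():
--             in_word = False
--         else:
--             if not in_word:
--                 score += 1
--                 in_word = True
--             if c == '!':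
--                 score += 2
--             elif c == '?':
--                 score += 1
--             elif c.isupper():
--                 score += 1
--     return score
-- ===== Notes on version B (the rewrite author's own statement) =====
-- stated objective: alternative
-- what changed: Replaces the four passes (split()+two count()s+an isupper generator-sum) with one fused pass that keeps an in_word flag and one accumulator, counting word starts and adding the punctuation/uppercase weights as it goes.
import Mathlib
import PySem

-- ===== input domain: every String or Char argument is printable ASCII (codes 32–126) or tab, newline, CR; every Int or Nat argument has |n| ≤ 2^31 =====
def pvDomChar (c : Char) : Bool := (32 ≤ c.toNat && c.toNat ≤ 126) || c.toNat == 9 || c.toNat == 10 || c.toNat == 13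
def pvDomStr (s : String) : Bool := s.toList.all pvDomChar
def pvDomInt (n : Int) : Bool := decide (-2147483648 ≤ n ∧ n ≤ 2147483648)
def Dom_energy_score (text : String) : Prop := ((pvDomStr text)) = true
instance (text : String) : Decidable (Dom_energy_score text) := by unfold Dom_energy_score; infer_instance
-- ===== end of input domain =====

-- B fuses A's four passes (split() + two count()s + an isupper sum) into one pass with an
-- in_word flag and a single accumulator; same cost class, different decomposition (objective: alternative).

-- ===== PORT A =====
def energy_score (text : String) : Int :=
  ((PySem.Str.split₀ text).length : Int)
    + (PySem.Str.count text "!" : Int) * 2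
    + (PySem.Str.count text "?" : Int)
    + text.toList.foldl (fun acc c => if PySem.Chars.isupper c then acc + 1 else acc) (0 : Int)

-- ===== PORT B =====
/-- One step of B's fused loop (the body of its `for c in text`). -/
def pvStep (st : Bool × Int) (c : Char) : Bool × Int :=
  if PySem.Chars.isspace c then (false, st.2)
  else
    let s1 : Int := if st.1 then st.2 else st.2 + 1
    let s2 : Int :=
      if c == '!' then s1 + 2
      else if c == '?' then s1 + 1
      else if PySem.Chars.isupper c then s1 + 1
      else s1
    (true, s2)

def energy_score_alt (text : String) : Int :=
  (text.toList.foldl pvStep ((false, (0 : Int)))).2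

-- ===== PRECONDITION & SPEC =====
def Spec_energy_score (text : String) (out : Int) : Prop := out = energy_score_alt text
instance (text : String) (out : Int) : Decidable (Spec_energy_score text out) := by unfold Spec_energy_score; infer_instance

-- ===== CLAIM (what is proved, stated in full; the proofs are below) =====
def Claim_equal_energy_score : Prop := ∀ (text : String), Dom_energy_score text → Spec_energy_score text (energy_score text)

-- ===== LEMMAS AND PROOFS =====

/-- Number of words (maximal whitespace-free runs) in `cs`, given whether we are inside a word. -/
def pvWC : List Char → Bool → Nat
  | [], _ => 0
  | c :: r, inw =>
    if PySem.Chars.isspace c then pvWC r false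
    else (if inw then 0 else 1) + pvWC r true

/-- `Chars.split₀.go` produces `acc` plus the words of `cs` (with `cur` the pending word). -/
theorem pv_go_len (cs : List Char) : ∀ (cur : List Char) (acc : List (List Char)),
    (PySem.Chars.split₀.go cs cur acc).length
      = acc.length + (if cur.isEmpty then 0 else 1) + pvWC cs (!cur.isEmpty) := by
  induction cs with
  | nil =>
      intro cur acc
      by_cases h : cur.isEmpty <;> simp [PySem.Chars.split₀.go, h, pvWC]
  | cons c r ih =>
      intro cur acc
      by_cases hs : PySem.Chars.isspace c
      · by_cases h : cur.isEmpty <;>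
          simp [PySem.Chars.split₀.go, hs, h, pvWC, ih] <;> omega
      · by_cases h : cur.isEmpty <;>
          simp [PySem.Chars.split₀.go, hs, h, pvWC, ih] <;> omega

theorem pv_split_len (cs : List Char) : (PySem.Chars.split₀ cs).length = pvWC cs false := by
  simpa [PySem.Chars.split₀] using pv_go_len cs [] []

/-- `Chars.count` with a single-character needle is `List.count`. -/
theorem pv_count_go_single (c : Char) (cs : List Char) : ∀ (fuel acc : Nat),
    cs.length ≤ fuel → PySem.Chars.count.go [c] fuel cs acc = acc + cs.count c := by
  induction cs with
  | nil => intro fuel acc _; cases fuel <;> simp [PySem.Chars.count.go]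
  | cons h t ih =>
      intro fuel acc hf
      cases fuel with
      | zero => simp at hf
      | succ f =>
          by_cases he : h = c
          · simp [PySem.Chars.count.go, he, List.isPrefixOf, List.count_cons,
              ih f (acc + 1) (by simpa using Nat.lt_succ_iff.mp (Nat.lt_of_lt_of_le (Nat.lt_succ_self _) hf))]
            omega
          · simp [PySem.Chars.count.go, List.isPrefixOf, he, Ne.symm he, List.count_cons,
              ih f acc (by simpa using Nat.lt_succ_iff.mp (Nat.lt_of_lt_of_le (Nat.lt_succ_self _) hf))]

theorem pv_count_single (c : Char) (cs : List Char) :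
    PySem.Chars.count cs [c] = cs.count c := by
  simp [PySem.Chars.count, pv_count_go_single c cs cs.length 0 le_rfl]

theorem pv_space_not_upper (c : Char) (hs : PySem.Chars.isspace c = true) :
    PySem.Chars.isupper c = false := by
  simp only [PySem.Chars.isspace, Bool.or_eq_true, decide_eq_true_eq, Bool.and_eq_true] at hs
  simp only [PySem.Chars.isupper, Bool.and_eq_false_iff, decide_eq_false_iff_not, not_le]
  rcases Nat.lt_or_ge c.toNat 65 with h | h
  · exact Or.inl (by rw [Char.lt_def, UInt32.lt_iff_toNat_lt]; exact h)
  · exact Or.inr (by rw [Char.lt_def, UInt32.lt_iff_toNat_lt]; show 90 < c.toNat; omega)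
theorem pv_alt_fold (cs : List Char) : ∀ (inw : Bool) (acc : Int),
    (cs.foldl pvStep (inw, acc)).2
    = acc + (pvWC cs inw : Int) + 2 * (cs.count '!' : Int) + (cs.count '?' : Int)
        + (cs.countP (fun c => PySem.Chars.isupper c) : Int) := by
  induction cs with
  | nil => intro inw acc; simp [pvWC]
  | cons c r ih =>
      intro inw acc
      rw [List.foldl_cons]
      by_cases hs : PySem.Chars.isspace c
      · have hstep : pvStep (inw, acc) c = (false, acc) := by simp [pvStep, hs]
        have hb : c ≠ '!' := by rintro rfl; exact absurd hs (by decide)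
        have hq : c ≠ '?' := by rintro rfl; exact absurd hs (by decide)
        rw [hstep, ih]
        simp [pvWC, hs, List.count_cons, List.countP_cons, hb, hq, pv_space_not_upper c hs]
      · have hwc : pvWC (c :: r) inw = (if inw then 0 else 1) + pvWC r true := by
          simp [pvWC, hs]
        by_cases hb : c = '!'
        · have hstep : pvStep (inw, acc) c = (true, (if inw then acc else acc + 1) + 2) := by
            subst hb; simp [pvStep, (by decide : PySem.Chars.isspace '!' = false)]
          rw [hstep, ih]
          subst hb
          simp [hwc, List.count_cons, List.countP_cons,
            (by decide : PySem.Chars.isupper '!' = false)]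
          cases inw <;> split_ifs <;> push_cast <;> ring
        · by_cases hq : c = '?'
          · have hstep : pvStep (inw, acc) c = (true, (if inw then acc else acc + 1) + 1) := by
              subst hq; simp [pvStep, (by decide : PySem.Chars.isspace '?' = false), hb]
            rw [hstep, ih]
            subst hq
            simp [hwc, List.count_cons, List.countP_cons, Ne.symm hb,
              (by decide : PySem.Chars.isupper '?' = false)]
            cases inw <;> split_ifs <;> push_cast <;> ring
          · by_cases hu : PySem.Chars.isupper c
            · have hstep : pvStep (inw, acc) c = (true, (if inw then acc else acc + 1) + 1) := by
                simp [pvStep, hs, hb, hq, hu]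
              rw [hstep, ih]
              simp [hwc, List.count_cons, List.countP_cons, hb, hq, hu]
              cases inw <;> split_ifs <;> push_cast <;> ring
            · have hstep : pvStep (inw, acc) c = (true, if inw then acc else acc + 1) := by
                simp [pvStep, hs, hb, hq, hu]
              rw [hstep, ih]
              simp [hwc, List.count_cons, List.countP_cons, hb, hq, hu]
              cases inw <;> split_ifs <;> push_cast <;> ring

-- ===== VERDICT (by name: the statement is the Claim_ definition above) =====
theorem energy_score_spec : Claim_equal_energy_score := by
  intro text _
  unfold Spec_energy_score energy_score energy_score_alt
  rw [pv_alt_fold text.toList false 0]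
  simp only [PySem.Str.split₀, PySem.Str.count, List.length_map,
    pv_split_len, PySem.List.foldl_if_add_one]
  have h1 : ("!" : String).toList = ['!'] := rfl
  have h2 : ("?" : String).toList = ['?'] := rfl
  rw [h1, h2, pv_count_single, pv_count_single]
  push_cast
  ring
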